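-- pv_equiv track=rewrite | github.com/minsik-ai/ProblemSolving | CodeJam/2019/R1/B/ManhattanCrepeCart.py | solve
-- ===== SOURCE A (Python) =====
-- def solve(inputs, q):
--     inputs = [(int(x), int(y), d) for x, y, d in inputs]
--
--     horizontal_cands = [x + 1 for x, y, d in inputs]
--     horizontal_cands.append(0)
--
--     vertical_cands = [y + 1 for x, y, d in inputs]
--     vertical_cands.append(0)
--
--     max_horizontal = 0
--     max_count = 0
--     for cand in horizontal_cands:
--         count = 0
--         for x, y, d in inputs:
--             if d == "E" and x < cand:
--                 count += 1
--             elif d == "W" and x > cand: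
--                 count += 1
--         if count > max_count:
--             max_count = count
--             max_horizontal = cand
--         elif count == max_count and cand < max_horizontal:
--             max_horizontal = cand
--
--     max_vertical = 0
--     max_count = 0
--     for cand in vertical_cands:
--         count = 0
--         for x, y, d in inputs:
--             if d == "N" and y < cand:
--                 count += 1
--             elif d == "S" and y > cand:
--                 count += 1
--         if count > max_count:
--             max_count = count
--             max_vertical = cand
--         elif count == max_count and cand < max_vertical:
--             max_vertical = cand
--
--     return max_horizontal, max_vertical
-- ===== SOURCE B (Python) =====
-- def _best(pts, lo, hi):
--     # count(c) = hi_total + sum of deltas of events with threshold <= c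
--     events = []
--     hi_total = 0
--     for c, d in pts:
--         if d == lo:
--             events.append((c + 1, 1))
--         elif d == hi:
--             events.append((c, -1))
--             hi_total += 1
--     events.sort(key=lambda e: e[0])
--     cands = sorted(set([c + 1 for c, d in pts] + [0]))
--     best_c, best_cnt = 0, -1
--     run = hi_total
--     i = 0
--     for cand in cands:
--         while i < len(events) and events[i][0] <= cand:
--             run += events[i][1]
--             i += 1
--         if run > best_cnt:
--             best_c, best_cnt = cand, run
--     return best_c
--
--
-- def solve(inputs, q):
--     pts = [(int(x), int(y), d) for x, y, d in inputs]
--     return (_best([(x, d) for x, y, d in pts], "E", "W"),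
--             _best([(y, d) for x, y, d in pts], "N", "S"))
-- ===== Notes on version B (the rewrite author's own statement) =====
-- stated objective: faster
-- what changed: Replaces A's per-axis quadratic scan (recounting all points for every candidate) by a sorted event sweep: each directed point becomes a single +1/-1 threshold event, events and the deduplicated candidate coordinates are sorted once, and one running count over the ascending candidates tracks the maximum (first maximum = smallest tying candidate).
import Mathlib
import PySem

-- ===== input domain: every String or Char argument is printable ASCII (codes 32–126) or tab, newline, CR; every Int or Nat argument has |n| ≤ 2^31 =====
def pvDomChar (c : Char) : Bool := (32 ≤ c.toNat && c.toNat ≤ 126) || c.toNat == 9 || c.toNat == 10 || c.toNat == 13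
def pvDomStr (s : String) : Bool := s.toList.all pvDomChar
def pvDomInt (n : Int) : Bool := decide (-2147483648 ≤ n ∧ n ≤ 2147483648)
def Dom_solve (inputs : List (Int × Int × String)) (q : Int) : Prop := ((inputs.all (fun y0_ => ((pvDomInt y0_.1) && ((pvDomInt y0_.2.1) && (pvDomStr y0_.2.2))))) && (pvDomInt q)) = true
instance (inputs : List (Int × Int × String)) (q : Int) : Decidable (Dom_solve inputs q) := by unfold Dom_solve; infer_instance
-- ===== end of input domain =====

-- B replaces A's quadratic candidate×point double scan per axis by a sorted event sweep
-- (directed points become ±1 threshold events; one running count over the sorted unique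
-- candidates), an O(n log n) algorithm returning the same coordinates.

-- ===== PORT A =====
def solve (inputs : List (Int × Int × String)) (q : Int) : Int × Int :=
  let horizontal_cands := inputs.map (fun p => p.1 + 1) ++ [0]
  let vertical_cands := inputs.map (fun p => p.2.1 + 1) ++ [0]
  let h := horizontal_cands.foldl (fun (s : Int × Int) cand =>
      let count := inputs.foldl (fun c p =>
          if p.2.2 = "E" ∧ p.1 < cand then c + 1
          else if p.2.2 = "W" ∧ p.1 > cand then c + 1 else c) 0
      if count > s.2 then (cand, count)
      else if count = s.2 ∧ cand < s.1 then (cand, s.2) else s) (0, 0)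
  let v := vertical_cands.foldl (fun (s : Int × Int) cand =>
      let count := inputs.foldl (fun c p =>
          if p.2.2 = "N" ∧ p.2.1 < cand then c + 1
          else if p.2.2 = "S" ∧ p.2.1 > cand then c + 1 else c) 0
      if count > s.2 then (cand, count)
      else if count = s.2 ∧ cand < s.1 then (cand, s.2) else s) (0, 0)
  (h.1, v.1)

-- ===== PORT B =====
-- the inner 'while i < len(events) and events[i][0] <= cand' of Source B: consume the
-- leading events with threshold ≤ cand, adding their deltas to the running count
def pvAdvance (events : List (Int × Int)) (cand : Int) (run : Int) : List (Int × Int) × Int :=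
  match events with
  | [] => ([], run)
  | e :: rest => if e.1 ≤ cand then pvAdvance rest cand (run + e.2) else (e :: rest, run)

-- the 'for cand in cands' loop of Source B with state (best_c, best_cnt)
def pvSweep (cands : List Int) (events : List (Int × Int)) (run bc bcnt : Int) : Int × Int :=
  match cands with
  | [] => (bc, bcnt)
  | cand :: rest =>
    let ar := pvAdvance events cand run
    if ar.2 > bcnt then pvSweep rest ar.1 ar.2 cand ar.2
    else pvSweep rest ar.1 ar.2 bc bcnt

-- _best of Source B
def pvBest (pts : List (Int × String)) (lo hi : String) : Int :=
  let eh := pts.foldl (fun (s : List (Int × Int) × Int) cd =>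
      if cd.2 = lo then (s.1 ++ [(cd.1 + 1, 1)], s.2)
      else if cd.2 = hi then (s.1 ++ [(cd.1, -1)], s.2 + 1) else s) ([], 0)
  let events := PySem.List.sorted eh.1 (fun e => e.1) false
  let cands := PySem.List.sorted (PySem.Set.ofList (pts.map (fun p => p.1 + 1) ++ [0])) (fun x => x) false
  (pvSweep cands events eh.2 0 (-1)).1

def solve_alt (inputs : List (Int × Int × String)) (q : Int) : Int × Int :=
  (pvBest (inputs.map (fun p => (p.1, p.2.2))) "E" "W",
   pvBest (inputs.map (fun p => (p.2.1, p.2.2))) "N" "S")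

-- ===== PRECONDITION & SPEC =====
def Spec_solve (inputs : List (Int × Int × String)) (q : Int) (out : Int × Int) : Prop := out = solve_alt inputs q
instance (inputs : List (Int × Int × String)) (q : Int) (out : Int × Int) : Decidable (Spec_solve inputs q out) := by unfold Spec_solve; infer_instance

-- ===== CLAIM (what is proved, stated in full; the proofs are below) =====
def Claim_equal_solve : Prop := ∀ (inputs : List (Int × Int × String)) (q : Int), Dom_solve inputs q → Spec_solve inputs q (solve inputs q)

-- ===== LEMMAS AND PROOFS =====

-- '(c₁, n₁) strictly better than (c₂, n₂)': larger count, or equal count and smaller coordinate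
def pvLt (a b : Int × Int) : Prop := b.2 < a.2 ∨ (a.2 = b.2 ∧ a.1 < b.1)

-- A's inner count for one axis, over projected (coordinate, direction) pairs
def pvF (pts : List (Int × String)) (lo hi : String) (cand : Int) : Int :=
  pts.foldl (fun c p => if p.2 = lo ∧ p.1 < cand then c + 1
                        else if p.2 = hi ∧ p.1 > cand then c + 1 else c) 0

-- A's selection step
def pvAStep (g : Int → Int) (s : Int × Int) (cand : Int) : Int × Int :=
  if g cand > s.2 then (cand, g cand)
  else if g cand = s.2 ∧ cand < s.1 then (cand, s.2) else s

-- B's selection loop, abstracted over the count function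
def pvSelect (cands : List Int) (g : Int → Int) (s : Int × Int) : Int × Int :=
  cands.foldl (fun s c => if g c > s.2 then (c, g c) else s) s

-- sum of deltas of events with threshold ≤ c
def pvSumLE (ev : List (Int × Int)) (c : Int) : Int :=
  ((ev.filter (fun e => decide (e.1 ≤ c))).map (fun e => e.2)).sum

lemma pvLt_irrefl (a : Int × Int) : ¬ pvLt a a := by
  obtain ⟨a1, a2⟩ := a; simp only [pvLt]; omega

lemma pvLt_not_not_trans {a b c : Int × Int} (h1 : ¬ pvLt a b) (h2 : ¬ pvLt b c) : ¬ pvLt a c := by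
  obtain ⟨a1, a2⟩ := a; obtain ⟨b1, b2⟩ := b; obtain ⟨c1, c2⟩ := c
  simp only [pvLt] at *; omega

lemma pvLt_shift {a s r : Int × Int} (h1 : ¬ pvLt a r) (h2 : pvLt a s) : ¬ pvLt s r := by
  obtain ⟨a1, a2⟩ := a; obtain ⟨s1, s2⟩ := s; obtain ⟨r1, r2⟩ := r
  simp only [pvLt] at *; omega

lemma pv_eq {a b : Int × Int} (h1 : ¬ pvLt a b) (h2 : ¬ pvLt b a) : a = b := by
  obtain ⟨a1, a2⟩ := a; obtain ⟨b1, b2⟩ := b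
  simp only [pvLt] at *; simp only [Prod.mk.injEq]; omega

lemma pv_zero {g0 : Int} {r : Int × Int} (h0 : 0 ≤ g0) (h1 : ¬ pvLt (0, g0) r) :
    ¬ pvLt (0, 0) r := by
  obtain ⟨r1, r2⟩ := r; simp only [pvLt] at *; omega

lemma pvAStep_pos {g : Int → Int} {s : Int × Int} {c : Int} (h : pvLt (c, g c) s) :
    pvAStep g s c = (c, g c) := by
  unfold pvAStep
  rcases h with h | ⟨h1, h2⟩
  · rw [if_pos h]
  · rw [if_neg (by simp only [gt_iff_lt]; omega), if_pos ⟨h1, h2⟩]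
    exact Prod.ext rfl h1.symm

lemma pvAStep_neg {g : Int → Int} {s : Int × Int} {c : Int} (h : ¬ pvLt (c, g c) s) :
    pvAStep g s c = s := by
  unfold pvAStep
  simp only [pvLt, not_or] at h
  rw [if_neg (by omega), if_neg h.2]

lemma foldA_min (g : Int → Int) : ∀ (l : List Int) (s : Int × Int),
    (l.foldl (pvAStep g) s = s ∨ ∃ c ∈ l, l.foldl (pvAStep g) s = (c, g c)) ∧
    ¬ pvLt s (l.foldl (pvAStep g) s) ∧
    ∀ c ∈ l, ¬ pvLt (c, g c) (l.foldl (pvAStep g) s) := by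
  intro l
  induction l with
  | nil => intro s; exact ⟨Or.inl rfl, pvLt_irrefl s, by simp⟩
  | cons c l ih =>
    intro s
    rw [List.foldl_cons]
    by_cases h : pvLt (c, g c) s
    · rw [pvAStep_pos h]
      obtain ⟨hmem, hs, hall⟩ := ih (c, g c)
      refine ⟨?_, ?_, ?_⟩
      · rcases hmem with h' | ⟨c', hc', h'⟩
        · exact Or.inr ⟨c, by simp, h'⟩
        · exact Or.inr ⟨c', by simp [hc'], h'⟩
      · exact pvLt_shift hs h
      · intro c' hc'
        rcases List.mem_cons.mp hc' with rfl | hc'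
        · exact hs
        · exact hall c' hc'
    · rw [pvAStep_neg h]
      obtain ⟨hmem, hs, hall⟩ := ih s
      refine ⟨?_, hs, ?_⟩
      · rcases hmem with h' | ⟨c', hc', h'⟩
        · exact Or.inl h'
        · exact Or.inr ⟨c', by simp [hc'], h'⟩
      · intro c' hc'
        rcases List.mem_cons.mp hc' with rfl | hc'
        · exact pvLt_not_not_trans h hs
        · exact hall c' hc'

lemma select_congr (g g' : Int → Int) : ∀ (l : List Int) (s : Int × Int),
    (∀ c ∈ l, g c = g' c) → pvSelect l g s = pvSelect l g' s := by
  intro l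
  induction l with
  | nil => intro s _; rfl
  | cons c l ih =>
    intro s h
    simp only [pvSelect, List.foldl_cons] at *
    rw [h c (by simp)]
    exact ih _ (fun c' hc' => h c' (by simp [hc']))

lemma select_min (g : Int → Int) : ∀ (l : List Int) (s : Int × Int),
    l.Pairwise (· < ·) → (∀ c ∈ l, s.1 < c) →
    (pvSelect l g s = s ∨ ∃ c ∈ l, pvSelect l g s = (c, g c)) ∧
    ¬ pvLt s (pvSelect l g s) ∧
    ∀ c ∈ l, ¬ pvLt (c, g c) (pvSelect l g s) := by
  intro l
  induction l with
  | nil => intro s _ _; exact ⟨Or.inl rfl, pvLt_irrefl s, by simp⟩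
  | cons c l ih =>
    intro s hpw hlt
    simp only [pvSelect, List.foldl_cons]
    by_cases h : g c > s.2
    · rw [if_pos h]
      obtain ⟨hmem, hs, hall⟩ := ih (c, g c) hpw.of_cons
        (fun c' hc' => (List.pairwise_cons.mp hpw).1 c' hc')
      have hlt1 : pvLt (c, g c) s := Or.inl h
      refine ⟨?_, pvLt_shift hs hlt1, ?_⟩
      · rcases hmem with h' | ⟨c', hc', h'⟩
        · exact Or.inr ⟨c, by simp, h'⟩
        · exact Or.inr ⟨c', by simp [hc'], h'⟩
      · intro c' hc'
        rcases List.mem_cons.mp hc' with rfl | hc'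
        · exact hs
        · exact hall c' hc'
    · rw [if_neg h]
      obtain ⟨hmem, hs, hall⟩ := ih s hpw.of_cons
        (fun c' hc' => hlt c' (by simp [hc']))
      have hc : s.1 < c := hlt c (by simp)
      have hnlt : ¬ pvLt (c, g c) s := by
        simp only [pvLt]
        omega
      refine ⟨?_, hs, ?_⟩
      · rcases hmem with h' | ⟨c', hc', h'⟩
        · exact Or.inl h'
        · exact Or.inr ⟨c', by simp [hc'], h'⟩
      · intro c' hc'
        rcases List.mem_cons.mp hc' with rfl | hc'
        · exact pvLt_not_not_trans hnlt hs
        · exact hall c' hc'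

lemma pvSumLE_cons (e : Int × Int) (ev : List (Int × Int)) (c : Int) :
    pvSumLE (e :: ev) c = (if e.1 ≤ c then e.2 else 0) + pvSumLE ev c := by
  simp only [pvSumLE, List.filter_cons]
  by_cases h : e.1 ≤ c <;> simp [h]

lemma pvSumLE_append (a b : List (Int × Int)) (c : Int) :
    pvSumLE (a ++ b) c = pvSumLE a c + pvSumLE b c := by
  simp [pvSumLE, List.filter_append]

lemma pvSumLE_split (ev : List (Int × Int)) {c c' : Int} (h : c ≤ c') :
    pvSumLE ev c' = pvSumLE ev c + pvSumLE (ev.filter (fun e => decide (c < e.1))) c' := by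
  induction ev with
  | nil => simp [pvSumLE]
  | cons e ev ih =>
    by_cases h1 : c < e.1
    · have hf : List.filter (fun e => decide (c < e.1)) (e :: ev)
          = e :: List.filter (fun e => decide (c < e.1)) ev := by
        simp [List.filter_cons, h1]
      rw [pvSumLE_cons, pvSumLE_cons, hf, pvSumLE_cons]
      split_ifs <;> omega
    · have hf : List.filter (fun e => decide (c < e.1)) (e :: ev)
          = List.filter (fun e => decide (c < e.1)) ev := by
        simp [List.filter_cons, h1]
      rw [pvSumLE_cons, pvSumLE_cons, hf]
      split_ifs <;> omega

lemma pvAdvance_spec (cand : Int) : ∀ (ev : List (Int × Int)) (run : Int),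
    ev.Pairwise (fun a b => a.1 ≤ b.1) →
    pvAdvance ev cand run = (ev.filter (fun e => decide (cand < e.1)), run + pvSumLE ev cand) := by
  intro ev
  induction ev with
  | nil => intro run _; simp [pvAdvance, pvSumLE]
  | cons e ev ih =>
    intro run hpw
    rw [pvAdvance]
    by_cases h : e.1 ≤ cand
    · rw [if_pos h, ih _ hpw.of_cons, List.filter_cons, pvSumLE_cons]
      have : ¬ cand < e.1 := by omega
      simp only [this, decide_false, h, if_true]
      refine congrArg _ ?_
      omega
    · rw [if_neg h]
      have hall : ∀ b ∈ ev, cand < b.1 := fun b hb => by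
        have := (List.pairwise_cons.mp hpw).1 b hb; omega
      have h1 : List.filter (fun e => decide (cand < e.1)) (e :: ev) = e :: ev := by
        rw [List.filter_eq_self]
        intro b hb
        rcases List.mem_cons.mp hb with rfl | hb
        · simp; omega
        · simp [hall b hb]
      have h2 : pvSumLE (e :: ev) cand = 0 := by
        rw [pvSumLE_cons]
        have : pvSumLE ev cand = 0 := by
          simp only [pvSumLE]
          have : List.filter (fun e => decide (e.1 ≤ cand)) ev = [] := by
            rw [List.filter_eq_nil_iff]
            intro b hb; simp; have := hall b hb; omega
          simp [this]
        simp [h, this]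
      rw [h1, h2]
      simp

lemma sweep_eq : ∀ (cands : List Int) (ev : List (Int × Int)) (run bc bcnt : Int),
    ev.Pairwise (fun a b => a.1 ≤ b.1) → cands.Pairwise (· ≤ ·) →
    pvSweep cands ev run bc bcnt = pvSelect cands (fun c => run + pvSumLE ev c) (bc, bcnt) := by
  intro cands
  induction cands with
  | nil => intro ev run bc bcnt _ _; rfl
  | cons cand rest ih =>
    intro ev run bc bcnt hev hpw
    rw [pvSweep, pvAdvance_spec cand ev run hev]
    have hevf : (ev.filter (fun e => decide (cand < e.1))).Pairwise (fun a b => a.1 ≤ b.1) :=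
      hev.filter _
    have hcongr : ∀ bc' bcnt' : Int,
        pvSweep rest (ev.filter (fun e => decide (cand < e.1))) (run + pvSumLE ev cand) bc' bcnt'
          = pvSelect rest (fun c => run + pvSumLE ev c) (bc', bcnt') := by
      intro bc' bcnt'
      rw [ih _ _ _ _ hevf hpw.of_cons]
      refine select_congr _ _ rest _ (fun c hc => ?_)
      have hle : cand ≤ c := (List.pairwise_cons.mp hpw).1 c hc
      rw [pvSumLE_split ev hle]
      omega
    simp only [pvSelect, List.foldl_cons]
    by_cases h : run + pvSumLE ev cand > bcnt
    · rw [if_pos h]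
      simp only [h, if_pos]
      exact hcongr cand (run + pvSumLE ev cand)
    · rw [if_neg h]
      simp only [h]
      exact hcongr bc bcnt

lemma pvF_shift (lo hi : String) (cand : Int) : ∀ (pts : List (Int × String)) (c0 : Int),
    pts.foldl (fun c p => if p.2 = lo ∧ p.1 < cand then c + 1
                          else if p.2 = hi ∧ p.1 > cand then c + 1 else c) c0
      = c0 + pts.foldl (fun c p => if p.2 = lo ∧ p.1 < cand then c + 1
                          else if p.2 = hi ∧ p.1 > cand then c + 1 else c) 0 := by
  intro pts
  induction pts with
  | nil => intro c0; simp
  | cons p pts ih =>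
    intro c0
    rw [List.foldl_cons, List.foldl_cons]
    conv_lhs => rw [ih]
    conv_rhs => rw [ih]
    split_ifs <;> omega

lemma pvF_cons (lo hi : String) (cand : Int) (p : Int × String) (pts : List (Int × String)) :
    pvF (p :: pts) lo hi cand
      = (if p.2 = lo ∧ p.1 < cand then 1 else if p.2 = hi ∧ p.1 > cand then 1 else 0)
        + pvF pts lo hi cand := by
  simp only [pvF, List.foldl_cons]
  rw [pvF_shift]
  split_ifs <;> omega

lemma pvF_nonneg (pts : List (Int × String)) (lo hi : String) (cand : Int) :
    0 ≤ pvF pts lo hi cand := by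
  induction pts with
  | nil => simp [pvF]
  | cons p pts ih =>
    rw [pvF_cons]
    split_ifs <;> omega

lemma pvSumLE_singleton (e : Int × Int) (c : Int) :
    pvSumLE [e] c = if e.1 ≤ c then e.2 else 0 := by
  rw [pvSumLE_cons]
  have : pvSumLE [] c = 0 := by simp [pvSumLE]
  rw [this]
  omega

lemma count_id {lo hi : String} (hne : lo ≠ hi) (cand : Int) :
    ∀ (pts : List (Int × String)) (acc : List (Int × Int)) (w : Int),
    (pts.foldl (fun (s : List (Int × Int) × Int) cd =>
        if cd.2 = lo then (s.1 ++ [(cd.1 + 1, 1)], s.2)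
        else if cd.2 = hi then (s.1 ++ [(cd.1, -1)], s.2 + 1) else s) (acc, w)).2
      + pvSumLE (pts.foldl (fun (s : List (Int × Int) × Int) cd =>
        if cd.2 = lo then (s.1 ++ [(cd.1 + 1, 1)], s.2)
        else if cd.2 = hi then (s.1 ++ [(cd.1, -1)], s.2 + 1) else s) (acc, w)).1 cand
      = w + pvSumLE acc cand + pvF pts lo hi cand := by
  intro pts
  induction pts with
  | nil => intro acc w; simp [pvF]
  | cons p pts ih =>
    intro acc w
    rw [List.foldl_cons, pvF_cons]
    by_cases h1 : p.2 = lo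
    · rw [if_pos h1, ih, pvSumLE_append, pvSumLE_singleton]
      simp only [h1, true_and]
      have hlohi : ¬ (lo = hi ∧ p.1 > cand) := fun hc => hne hc.1
      rw [if_neg hlohi]
      split_ifs <;> omega
    · rw [if_neg h1]
      by_cases h2 : p.2 = hi
      · rw [if_pos h2, ih, pvSumLE_append, pvSumLE_singleton]
        have hno : ¬ (p.2 = lo ∧ p.1 < cand) := fun hc => h1 hc.1
        rw [if_neg hno]
        simp only [h2, true_and]
        split_ifs <;> omega
      · rw [if_neg h2, ih]
        have hno : ¬ (p.2 = lo ∧ p.1 < cand) := fun hc => h1 hc.1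
        have hno' : ¬ (p.2 = hi ∧ p.1 > cand) := fun hc => h2 hc.1
        rw [if_neg hno, if_neg hno']
        omega

lemma pvSumLE_perm {a b : List (Int × Int)} (h : a.Perm b) (c : Int) :
    pvSumLE a c = pvSumLE b c := by
  exact List.Perm.sum_eq ((h.filter _).map _)

lemma axis_eq (pts : List (Int × String)) (lo hi : String) (hne : lo ≠ hi) :
    ((pts.map (fun p : Int × String => p.1 + 1) ++ [0]).foldl (pvAStep (pvF pts lo hi)) (0, 0)).1
      = pvBest pts lo hi := by
  set g := pvF pts lo hi with hgdef
  set candsA := pts.map (fun p : Int × String => p.1 + 1) ++ [0] with hcA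
  set eh := pts.foldl (fun (s : List (Int × Int) × Int) cd =>
      if cd.2 = lo then (s.1 ++ [(cd.1 + 1, 1)], s.2)
      else if cd.2 = hi then (s.1 ++ [(cd.1, -1)], s.2 + 1) else s) (([] : List (Int × Int)), (0 : Int)) with heh
  set events := PySem.List.sorted eh.1 (fun e => e.1) false with hevents
  set candsB := PySem.List.sorted (PySem.Set.ofList candsA) (fun x => x) false with hcB
  have hBdef : pvBest pts lo hi = (pvSweep candsB events eh.2 0 (-1)).1 := rfl
  rw [hBdef]
  have hev_pw : events.Pairwise (fun a b => a.1 ≤ b.1) := PySem.List.sorted_pairwise _ _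
  have hcB_lt : candsB.Pairwise (· < ·) := PySem.List.sorted_ofList_pairwise_lt _
  have hcB_le : candsB.Pairwise (· ≤ ·) := hcB_lt.imp le_of_lt
  rw [sweep_eq candsB events eh.2 0 (-1) hev_pw hcB_le]
  have hgc : ∀ c, eh.2 + pvSumLE events c = g c := by
    intro c
    have hperm : pvSumLE events c = pvSumLE eh.1 c :=
      pvSumLE_perm (PySem.List.sorted_perm _ _ _) c
    have hid := count_id hne c pts [] 0
    have h0 : pvSumLE ([] : List (Int × Int)) c = 0 := by simp [pvSumLE]
    rw [← heh] at hid
    rw [hgdef, hperm]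
    omega
  rw [select_congr _ g candsB (0, -1) (fun c _ => hgc c)]
  have h0mem : (0 : Int) ∈ candsB := by
    rw [hcB]
    exact (PySem.List.mem_sorted _ _ _ _).mpr ((PySem.Set.mem_ofList _ _).mpr (by simp [hcA]))
  have hmemAB : ∀ c : Int, c ∈ candsB ↔ c ∈ candsA := by
    intro c
    rw [hcB]
    exact Iff.trans (PySem.List.mem_sorted _ _ _ _) (PySem.Set.mem_ofList _ _)
  have hgnn : ∀ c : Int, 0 ≤ g c := fun c => pvF_nonneg pts lo hi c
  obtain ⟨hAmem, hA0, hAall⟩ := foldA_min g candsA (0, 0)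
  rcases hBnil : candsB with _ | ⟨c0, rest⟩
  · rw [hBnil] at h0mem; simp at h0mem
  · have hstep : pvSelect (c0 :: rest) g (0, -1) = pvSelect rest g (c0, g c0) := by
      simp only [pvSelect, List.foldl_cons]
      rw [if_pos (show g c0 > ((0 : Int), (-1 : Int)).2 by have := hgnn c0; omega)]
    rw [hstep]
    rw [hBnil] at hcB_lt h0mem hmemAB
    obtain ⟨hpw0, hpwrest⟩ := List.pairwise_cons.mp hcB_lt
    obtain ⟨hBmem, hBs, hBall⟩ := select_min g rest (c0, g c0) hpwrest hpw0
    set rB := pvSelect rest g (c0, g c0) with hrB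
    set rA := candsA.foldl (pvAStep g) (0, 0) with hrA
    have hBall' : ∀ c ∈ c0 :: rest, ¬ pvLt (c, g c) rB := by
      intro c hc
      rcases List.mem_cons.mp hc with rfl | hc
      · exact hBs
      · exact hBall c hc
    have hBmem' : ∃ c ∈ c0 :: rest, rB = (c, g c) := by
      rcases hBmem with h' | ⟨c', hc', h'⟩
      · exact ⟨c0, by simp, h'⟩
      · exact ⟨c', by simp [hc'], h'⟩
    have hnAB : ¬ pvLt rA rB := by
      rcases hAmem with h' | ⟨c, hc, h'⟩
      · rw [h']
        exact pv_zero (hgnn 0) (hBall' 0 h0mem)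
      · rw [h']
        exact hBall' c ((hmemAB c).mpr hc)
    have hnBA : ¬ pvLt rB rA := by
      obtain ⟨c, hc, h'⟩ := hBmem'
      rw [h']
      exact hAall c ((hmemAB c).mp hc)
    rw [pv_eq hnAB hnBA]

lemma stepE_eq (inputs : List (Int × Int × String)) :
    (fun (s : Int × Int) cand =>
      let count := inputs.foldl (fun c p =>
          if p.2.2 = "E" ∧ p.1 < cand then c + 1
          else if p.2.2 = "W" ∧ p.1 > cand then c + 1 else c) 0
      if count > s.2 then (cand, count)
      else if count = s.2 ∧ cand < s.1 then (cand, s.2) else s)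
      = pvAStep (pvF (inputs.map (fun p : Int × Int × String => (p.1, p.2.2))) "E" "W") := by
  funext s cand
  simp only [pvAStep, pvF, List.foldl_map]

lemma stepN_eq (inputs : List (Int × Int × String)) :
    (fun (s : Int × Int) cand =>
      let count := inputs.foldl (fun c p =>
          if p.2.2 = "N" ∧ p.2.1 < cand then c + 1
          else if p.2.2 = "S" ∧ p.2.1 > cand then c + 1 else c) 0
      if count > s.2 then (cand, count)
      else if count = s.2 ∧ cand < s.1 then (cand, s.2) else s)
      = pvAStep (pvF (inputs.map (fun p : Int × Int × String => (p.2.1, p.2.2))) "N" "S") := by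
  funext s cand
  simp only [pvAStep, pvF, List.foldl_map]

lemma solve_eq (inputs : List (Int × Int × String)) (q : Int) :
    solve inputs q =
      (((inputs.map (fun p : Int × Int × String => p.1 + 1) ++ [0]).foldl
          (pvAStep (pvF (inputs.map (fun p : Int × Int × String => (p.1, p.2.2))) "E" "W")) (0, 0)).1,
       ((inputs.map (fun p : Int × Int × String => p.2.1 + 1) ++ [0]).foldl
          (pvAStep (pvF (inputs.map (fun p : Int × Int × String => (p.2.1, p.2.2))) "N" "S")) (0, 0)).1) := by
  unfold solve
  rw [stepE_eq, stepN_eq]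

-- ===== VERDICT (by name: the statement is the Claim_ definition above) =====
theorem solve_spec : Claim_equal_solve := by
  intro inputs q _
  unfold Spec_solve
  rw [solve_eq]
  show _ = (pvBest (inputs.map (fun p => (p.1, p.2.2))) "E" "W",
            pvBest (inputs.map (fun p => (p.2.1, p.2.2))) "N" "S")
  refine Prod.ext ?_ ?_
  · have h := axis_eq (inputs.map (fun p : Int × Int × String => (p.1, p.2.2))) "E" "W" (by decide)
    rw [List.map_map] at h
    simpa using h
  · have h := axis_eq (inputs.map (fun p : Int × Int × String => (p.2.1, p.2.2))) "N" "S" (by decide)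
    rw [List.map_map] at h
    simpa using h
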